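-- pv_equiv track=rewrite | github.com/alex-d-boyd/Advent-of-Code-2022 | Day_08/day_08.py | view_distance
-- ===== SOURCE A (Python) =====
-- from itertools import takewhile
--
-- def view_distance(r, c, direction, height_map):
--     rows, cols = len(height_map), len(height_map[0])
--     height = height_map[r][c]
--     match direction.lower():
--         case 'up':
--             if r == 0:
--                 return 0
--             path = [height_map[i][c] for i in range(r-1,-1,-1)]
--         case 'right':
--             if c == cols-1:
--                 return 0
--             path = height_map[r][c+1:]
--         case 'down':
--             if r == rows-1:
--                 return 0
--             path = [height_map[i][c] for i in range(r+1,rows)]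
--         case 'left':
--             if c == 0:
--                 return 0
--             path = height_map[r][c-1::-1]
--     if all(h < height for h in path):
--         return len(path)
--     else:
--         path = list(takewhile(lambda x: x < height, path))
--         return len(path)+1
-- ===== SOURCE B (Python) =====
-- def view_distance(r, c, direction, height_map):
--     rows, cols = len(height_map), len(height_map[0])
--     height = height_map[r][c]
--     match direction.lower():
--         case 'up':
--             dr, dc = -1, 0
--         case 'right':
--             dr, dc = 0, 1
--         case 'down':
--             dr, dc = 1, 0
--         case 'left':
--             dr, dc = 0, -1
--     count = 0
--     i, j = r + dr, c + dc
--     while 0 <= i < rows and 0 <= j < cols: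
--         count += 1
--         if height_map[i][j] >= height:
--             break
--         i += dr
--         j += dc
--     return count
-- ===== Notes on version B (the rewrite author's own statement) =====
-- stated objective: simpler
-- what changed: Replaced A's per-direction path-list construction followed by an all()/takewhile double scan with a single (dr,dc) index walk that maintains only a running count and stops at the first blocking tree.
-- outside the precondition, e.g. on view_distance(-2, -1, 'left', [[5, 1, 9], [2, 8, 3]]): A returns 2, B returns 0; on view_distance(1, 0, 'right', [[1, 2, 3], [9, 0]]): A returns 1, B raises IndexError
import Mathlib
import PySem

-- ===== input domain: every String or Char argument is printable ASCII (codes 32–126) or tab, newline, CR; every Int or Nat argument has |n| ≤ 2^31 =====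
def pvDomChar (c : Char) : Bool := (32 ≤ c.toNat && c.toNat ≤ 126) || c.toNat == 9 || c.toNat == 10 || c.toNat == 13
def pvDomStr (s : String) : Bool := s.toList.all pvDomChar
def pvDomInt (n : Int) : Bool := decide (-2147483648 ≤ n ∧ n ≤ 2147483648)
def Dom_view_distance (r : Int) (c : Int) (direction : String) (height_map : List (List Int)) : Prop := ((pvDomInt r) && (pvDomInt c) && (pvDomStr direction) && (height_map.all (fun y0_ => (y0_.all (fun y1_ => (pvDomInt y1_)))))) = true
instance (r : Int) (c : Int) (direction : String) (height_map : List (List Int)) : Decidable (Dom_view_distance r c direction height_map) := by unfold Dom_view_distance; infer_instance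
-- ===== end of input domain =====

-- B replaces A's per-direction path list plus the all()/takewhile double scan by a single
-- (dr,dc) index walk that maintains only a running count (objective: simpler).

-- ===== PORT A =====
-- A builds the list of heights on the path (none = the early 'return 0' branches, or the
-- unknown-direction case excluded by Pre_), then counts with all / takewhile as Python does.
def view_distance (r : Int) (c : Int) (direction : String) (height_map : List (List Int)) : Int :=
  let rows : Int := PySem.List.len height_map
  let cols : Int := PySem.List.len (PySem.List.pyGetD height_map 0 [])
  let height : Int := PySem.List.pyGetD (PySem.List.pyGetD height_map r []) c 0
  let d := PySem.Str.lower direction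
  let path? : Option (List Int) :=
    if d = "up" then
      if r = 0 then none
      else some ((PySem.List.pyRange (r-1) (-1) (-1)).map
                   (fun i => PySem.List.pyGetD (PySem.List.pyGetD height_map i []) c 0))
    else if d = "right" then
      if c = cols - 1 then none
      else some (PySem.List.slice (PySem.List.pyGetD height_map r []) (some (c+1)) none)
    else if d = "down" then
      if r = rows - 1 then none
      else some ((PySem.List.pyRange (r+1) rows 1).map
                   (fun i => PySem.List.pyGetD (PySem.List.pyGetD height_map i []) c 0))
    else if d = "left" then
      if c = 0 then none
      else some ((PySem.List.slice? (PySem.List.pyGetD height_map r []) (some (c-1)) none (-1)).getD [])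
    else none  -- unknown direction: Python raises UnboundLocalError; excluded by Pre_
  match path? with
  | none => 0
  | some path =>
    if path.all (fun h => h < height) then PySem.List.len path
    else PySem.List.len (path.takeWhile (fun x => x < height)) + 1

-- ===== PORT B =====
-- B's while loop: fuel = rows+cols bounds the walk length (each step moves one cell closer
-- to a grid edge), so the recursion is total; the loop body is exactly Source B's.
def pvWalk (height_map : List (List Int)) (height rows cols dr dc : Int) :
    Nat → Int → Int → Int → Int
  | 0, _, _, count => count
  | fuel+1, i, j, count =>
    if 0 ≤ i ∧ i < rows ∧ 0 ≤ j ∧ j < cols then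
      let count' := count + 1
      if height ≤ PySem.List.pyGetD (PySem.List.pyGetD height_map i []) j 0 then count'
      else pvWalk height_map height rows cols dr dc fuel (i+dr) (j+dc) count'
    else count

def view_distance_alt (r : Int) (c : Int) (direction : String) (height_map : List (List Int)) : Int :=
  let rows : Int := PySem.List.len height_map
  let cols : Int := PySem.List.len (PySem.List.pyGetD height_map 0 [])
  let height : Int := PySem.List.pyGetD (PySem.List.pyGetD height_map r []) c 0
  let dd : Int × Int :=
    match PySem.Str.lower direction with
    | "up" => (-1, 0)
    | "right" => (0, 1)
    | "down" => (1, 0)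
    | "left" => (0, -1)
    | _ => (0, 0)  -- unknown direction: Python raises UnboundLocalError; excluded by Pre_
  pvWalk height_map height rows cols dd.1 dd.2 (rows + cols).toNat (r + dd.1) (c + dd.2) 0

-- ===== PRECONDITION & SPEC =====
-- Pre_ is the puzzle's natural domain (a known direction, a non-empty rectangular grid,
-- wrap-valid indices) restricted, per direction, to the start positions on which A's value
-- is not an accident of Python's negative-index wraparound (out-of-grid walks and boundary
-- starts, where A returns 0, remain admitted). It excludes some inputs on which A still
-- returns (negative or ragged-row index combinations): there A's value comes from index
-- wraparound that B's bounded walk does not reproduce (it may even raise); see the cites.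
def Pre_view_distance (r : Int) (c : Int) (direction : String) (height_map : List (List Int)) : Prop :=
  (PySem.Str.lower direction = "up" ∨ PySem.Str.lower direction = "right" ∨
   PySem.Str.lower direction = "down" ∨ PySem.Str.lower direction = "left") ∧
  0 < (height_map.length : Int) ∧ 0 < ((height_map.headD []).length : Int) ∧
  (∀ row ∈ height_map, (row.length : Int) = ((height_map.headD []).length : Int)) ∧
  -(height_map.length : Int) ≤ r ∧ r < (height_map.length : Int) ∧
  -((height_map.headD []).length : Int) ≤ c ∧ c < ((height_map.headD []).length : Int) ∧
  (PySem.Str.lower direction = "up" → 0 ≤ c ∨ r ≤ 0) ∧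
  (PySem.Str.lower direction = "right" → (0 ≤ r ∧ -1 ≤ c) ∨ c = ((height_map.headD []).length : Int) - 1) ∧
  (PySem.Str.lower direction = "down" → (0 ≤ c ∧ -1 ≤ r) ∨ r = (height_map.length : Int) - 1) ∧
  (PySem.Str.lower direction = "left" → (0 ≤ r ∧ 0 ≤ c) ∨ c = 0)
instance (r : Int) (c : Int) (direction : String) (height_map : List (List Int)) : Decidable (Pre_view_distance r c direction height_map) := by unfold Pre_view_distance; infer_instance

def pvWitness_view_distance : Int × Int × String × List (List Int) :=
  (1, 0, "Down", [[3, 1], [2, 5], [4, 0]])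

def Spec_view_distance (r : Int) (c : Int) (direction : String) (height_map : List (List Int)) (out : Int) : Prop := out = view_distance_alt r c direction height_map
instance (r : Int) (c : Int) (direction : String) (height_map : List (List Int)) (out : Int) : Decidable (Spec_view_distance r c direction height_map out) := by unfold Spec_view_distance; infer_instance

-- ===== CLAIM (what is proved, stated in full; the proofs are below) =====
def Claim_equal_view_distance : Prop := ∀ (r : Int) (c : Int) (direction : String) (height_map : List (List Int)), Dom_view_distance r c direction height_map → Pre_view_distance r c direction height_map → Spec_view_distance r c direction height_map (view_distance r c direction height_map)

-- ===== LEMMAS AND PROOFS =====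

-- Count of a path the way B's loop counts it: one per tree, stopping at the first blocker.
def pvF (height : Int) : List Int → Int
  | [] => 0
  | h :: t => if height ≤ h then 1 else 1 + pvF height t

-- A's all/takewhile count equals pvF.
lemma pvF_eq_count (height : Int) (path : List Int) :
    (if path.all (fun h => h < height) then PySem.List.len path
     else PySem.List.len (path.takeWhile (fun x => x < height)) + 1) = pvF height path := by
  induction path with
  | nil => simp [pvF]
  | cons h t ih =>
    by_cases hb : h < height
    · simp only [pvF, List.all_cons, List.takeWhile, hb, decide_true, Bool.true_and,
        not_le.mpr hb, PySem.List.len_eq, List.length_cons] at ih ⊢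
      by_cases ha : t.all (fun x => decide (x < height))
      · simp [ha] at ih ⊢; omega
      · simp [ha] at ih ⊢; omega
    · simp [pvF, List.all_cons, List.takeWhile, hb, not_lt.mp hb]

-- The walk returns its count unchanged as soon as the position leaves the grid.
lemma pvWalk_stop (height_map : List (List Int)) (height rows cols dr dc : Int)
    (fuel : Nat) (i j count : Int) (hij : ¬ (0 ≤ i ∧ i < rows ∧ 0 ≤ j ∧ j < cols)) :
    pvWalk height_map height rows cols dr dc fuel i j count = count := by
  cases fuel with
  | zero => rfl
  | succ n => simp [pvWalk, hij]

lemma walk_down (height_map : List (List Int)) (height cols c : Int)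
    (hc : 0 ≤ c ∧ c < cols) :
    ∀ (fuel : Nat) (i count : Int), 0 ≤ i → ((height_map.length : Int) - i).toNat ≤ fuel →
    pvWalk height_map height (height_map.length : Int) cols 1 0 fuel i c count =
      count + pvF height ((PySem.List.pyRange i (height_map.length : Int) 1).map
        (fun k => PySem.List.pyGetD (PySem.List.pyGetD height_map k []) c 0)) := by
  intro fuel
  induction fuel with
  | zero =>
    intro i count h0 hf
    have : (height_map.length : Int) ≤ i := by omega
    simp [pvWalk, PySem.List.pyRange_one_eq_nil this, pvF]
  | succ n ih =>
    intro i count h0 hf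
    by_cases hi : i < (height_map.length : Int)
    · rw [PySem.List.pyRange_one_cons hi]
      simp only [pvWalk, List.map_cons, pvF]
      rw [if_pos ⟨h0, hi, hc.1, hc.2⟩]
      by_cases hblk : height ≤ PySem.List.pyGetD (PySem.List.pyGetD height_map i []) c 0
      · simp [hblk]
      · simp only [if_neg hblk, add_zero]
        rw [ih (i+1) (count+1) (by omega) (by omega)]
        ring
    · have : (PySem.List.pyRange i (height_map.length : Int) 1) = [] :=
        PySem.List.pyRange_one_eq_nil (by omega)
      simp [pvWalk, this, pvF, hi]

lemma walk_up (height_map : List (List Int)) (height cols c : Int)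
    (hc : 0 ≤ c ∧ c < cols) :
    ∀ (fuel : Nat) (i count : Int), i < (height_map.length : Int) → (i + 1).toNat ≤ fuel →
    pvWalk height_map height (height_map.length : Int) cols (-1) 0 fuel i c count =
      count + pvF height ((PySem.List.pyRange i (-1) (-1)).map
        (fun k => PySem.List.pyGetD (PySem.List.pyGetD height_map k []) c 0)) := by
  intro fuel
  induction fuel with
  | zero =>
    intro i count hi hf
    have : i ≤ -1 := by omega
    simp [pvWalk, PySem.List.pyRange_neg_one_eq_nil this, pvF]
  | succ n ih =>
    intro i count hi hf
    by_cases h0 : 0 ≤ i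
    · rw [PySem.List.pyRange_neg_one_cons (by omega : (-1:Int) < i)]
      simp only [pvWalk, List.map_cons, pvF]
      rw [if_pos ⟨h0, hi, hc.1, hc.2⟩]
      by_cases hblk : height ≤ PySem.List.pyGetD (PySem.List.pyGetD height_map i []) c 0
      · simp [hblk]
      · simp only [if_neg hblk, add_zero]
        rw [show i + (-1:Int) = i - 1 from by ring, ih (i-1) (count+1) (by omega) (by omega)]
        ring
    · have : (PySem.List.pyRange i (-1) (-1)) = [] :=
        PySem.List.pyRange_neg_one_eq_nil (by omega)
      simp [pvWalk, this, pvF, h0]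

lemma walk_right (height_map : List (List Int)) (height r cols : Int)
    (hr : 0 ≤ r ∧ r < (height_map.length : Int)) :
    ∀ (fuel : Nat) (j count : Int), 0 ≤ j → (cols - j).toNat ≤ fuel →
    pvWalk height_map height (height_map.length : Int) cols 0 1 fuel r j count =
      count + pvF height ((PySem.List.pyRange j cols 1).map
        (fun k => PySem.List.pyGetD (PySem.List.pyGetD height_map r []) k 0)) := by
  intro fuel
  induction fuel with
  | zero =>
    intro j count h0 hf
    have : cols ≤ j := by omega
    simp [pvWalk, PySem.List.pyRange_one_eq_nil this, pvF]
  | succ n ih =>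
    intro j count h0 hf
    by_cases hj : j < cols
    · rw [PySem.List.pyRange_one_cons hj]
      simp only [pvWalk, List.map_cons, pvF]
      rw [if_pos ⟨hr.1, hr.2, h0, hj⟩]
      by_cases hblk : height ≤ PySem.List.pyGetD (PySem.List.pyGetD height_map r []) j 0
      · simp [hblk]
      · simp only [if_neg hblk, add_zero]
        rw [ih (j+1) (count+1) (by omega) (by omega)]
        ring
    · have : (PySem.List.pyRange j cols 1) = [] :=
        PySem.List.pyRange_one_eq_nil (by omega)
      simp [pvWalk, this, pvF, hj]

lemma walk_left (height_map : List (List Int)) (height r cols : Int)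
    (hr : 0 ≤ r ∧ r < (height_map.length : Int)) :
    ∀ (fuel : Nat) (j count : Int), j < cols → (j + 1).toNat ≤ fuel →
    pvWalk height_map height (height_map.length : Int) cols 0 (-1) fuel r j count =
      count + pvF height ((PySem.List.pyRange j (-1) (-1)).map
        (fun k => PySem.List.pyGetD (PySem.List.pyGetD height_map r []) k 0)) := by
  intro fuel
  induction fuel with
  | zero =>
    intro j count hj hf
    have : j ≤ -1 := by omega
    simp [pvWalk, PySem.List.pyRange_neg_one_eq_nil this, pvF]
  | succ n ih =>
    intro j count hj hf
    by_cases h0 : 0 ≤ j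
    · rw [PySem.List.pyRange_neg_one_cons (by omega : (-1:Int) < j)]
      simp only [pvWalk, List.map_cons, pvF]
      rw [if_pos ⟨hr.1, hr.2, h0, hj⟩]
      by_cases hblk : height ≤ PySem.List.pyGetD (PySem.List.pyGetD height_map r []) j 0
      · simp [hblk]
      · simp only [if_neg hblk, add_zero]
        rw [show j + (-1:Int) = j - 1 from by ring, ih (j-1) (count+1) (by omega) (by omega)]
        ring
    · have : (PySem.List.pyRange j (-1) (-1)) = [] :=
        PySem.List.pyRange_neg_one_eq_nil (by omega)
      simp [pvWalk, this, pvF, h0]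

-- Indexing the filterMap form of a step -(1) slice.
lemma pvSliceAux (xs : List Int) (a : Int) (h0 : 0 ≤ a) (h1 : a < (xs.length : Int)) :
    ∀ n : Nat, n ≤ a.toNat + 1 →
    List.filterMap (fun k : Nat => xs[(a + -(k:Int)).toNat]?) (List.range n) =
      (List.range n).map (fun k : Nat => PySem.List.pyGetD xs (a - (k:Int)) 0) := by
  intro n
  induction n with
  | zero => simp
  | succ m ih =>
    intro hm
    rw [List.range_succ, List.filterMap_append, List.map_append, ih (by omega)]
    have e1 : a + -(m:Int) = a - (m:Int) := by ring
    have h3 : (a - (m:Int)).toNat < xs.length := by omega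
    simp only [List.filterMap_cons, List.filterMap_nil, List.map_cons, List.map_nil, e1,
      List.getElem?_eq_getElem h3]
    rw [PySem.List.pyGetD_eq_getElem xs 0 (by omega) (by omega)]

-- xs[a::-1] as the countdown-range map (0 ≤ a < len xs).
lemma slice_from_neg_one_step (xs : List Int) (a : Int) (h0 : 0 ≤ a) (h1 : a < (xs.length : Int)) :
    (PySem.List.slice? xs (some a) none (-1)).getD [] =
      (PySem.List.pyRange a (-1) (-1)).map (fun k => PySem.List.pyGetD xs k 0) := by
  rw [PySem.List.pyRange_neg_one, List.map_map]
  simp only [PySem.List.slice?, PySem.List.sliceIndices]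
  norm_num
  rw [if_neg (show ¬ a < 0 by omega)]
  rw [show min a ((xs.length:Int) - 1) = a from by omega]
  rw [if_pos (show (-1:Int) < a by omega)]
  rw [pvSliceAux xs a h0 h1 ((a+1).toNat) (by omega)]
  simp [Function.comp]

-- pyGetD at 0 is headD.
lemma pvGetD_zero_headD (hm : List (List Int)) :
    PySem.List.pyGetD hm 0 ([] : List Int) = hm.headD [] := by
  cases hm with
  | nil => decide
  | cons h t => rw [PySem.List.pyGetD_zero_cons]; rfl

-- ===== VERDICT (by name: the statement is the Claim_ definition above) =====
theorem view_distance_spec : Claim_equal_view_distance := by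
  intro r c direction height_map _ hpre
  obtain ⟨hd4, hrows, hcols, hrect, hrl, hrh, hcl, hch, hu, hri, hdn, hle⟩ := hpre
  unfold Spec_view_distance
  have hmem : PySem.List.pyGetD height_map r [] ∈ height_map :=
    PySem.List.pyGetD_mem height_map [] ⟨by omega, hrh⟩
  have hlen : ((PySem.List.pyGetD height_map r []).length : Int) =
      ((height_map.headD []).length : Int) := hrect _ hmem
  rcases hd4 with hd | hd | hd | hd
  · -- up
    simp only [view_distance, view_distance_alt, hd, PySem.List.len_eq, pvGetD_zero_headD,
      String.reduceEq, reduceIte]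
    rw [show r + (-1:Int) = r - 1 from by ring, show c + (0:Int) = c from by ring]
    by_cases hneg : r ≤ 0
    · rw [pvWalk_stop _ _ _ _ _ _ _ _ _ _ (by omega)]
      by_cases hz : r = 0
      · rw [if_pos hz]
      · rw [if_neg hz, PySem.List.pyRange_neg_one_eq_nil (show r - 1 ≤ -1 by omega)]
        simp
    · have hc0 : 0 ≤ c := (hu hd).resolve_right hneg
      rw [walk_up height_map _ _ c ⟨hc0, hch⟩ _ (r-1) 0 (by omega) (by omega)]
      rw [zero_add, if_neg (show ¬ r = 0 by omega)]
      exact pvF_eq_count _ _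
  · -- right
    simp only [view_distance, view_distance_alt, hd, PySem.List.len_eq, pvGetD_zero_headD,
      String.reduceEq, reduceIte]
    rw [show r + (0:Int) = r from by ring]
    by_cases hb : c = ((height_map.headD []).length : Int) - 1
    · rw [pvWalk_stop _ _ _ _ _ _ _ _ _ _ (by omega)]
      rw [if_pos hb]
    · have hcr : 0 ≤ r ∧ -1 ≤ c := (hri hd).resolve_right hb
      rw [walk_right height_map _ r _ ⟨hcr.1, hrh⟩ _ (c+1) 0 (by omega) (by omega)]
      rw [zero_add, ← hlen]
      rw [PySem.List.map_pyGetD_pyRange' (PySem.List.pyGetD height_map r []) 0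
        (show (0:Int) ≤ c + 1 by omega)]
      rw [PySem.List.slice_from (PySem.List.pyGetD height_map r [])
        (show (0:Int) ≤ c + 1 by omega)]
      rw [if_neg (show ¬ c = ((PySem.List.pyGetD height_map r []).length : Int) - 1 by omega)]
      exact pvF_eq_count _ _
  · -- down
    simp only [view_distance, view_distance_alt, hd, PySem.List.len_eq, pvGetD_zero_headD,
      String.reduceEq, reduceIte]
    rw [show c + (0:Int) = c from by ring]
    by_cases hb : r = (height_map.length : Int) - 1
    · rw [pvWalk_stop _ _ _ _ _ _ _ _ _ _ (by omega)]
      rw [if_pos hb]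
    · have hcd : 0 ≤ c ∧ -1 ≤ r := (hdn hd).resolve_right hb
      rw [walk_down height_map _ _ c ⟨hcd.1, hch⟩ _ (r+1) 0 (by omega) (by omega)]
      rw [zero_add, if_neg hb]
      exact pvF_eq_count _ _
  · -- left
    simp only [view_distance, view_distance_alt, hd, PySem.List.len_eq, pvGetD_zero_headD,
      String.reduceEq, reduceIte]
    rw [show r + (0:Int) = r from by ring, show c + (-1:Int) = c - 1 from by ring]
    by_cases hz : c = 0
    · rw [pvWalk_stop _ _ _ _ _ _ _ _ _ _ (by omega)]
      rw [if_pos hz]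
    · have hlr : 0 ≤ r ∧ 0 ≤ c := (hle hd).resolve_right hz
      rw [walk_left height_map _ r _ ⟨hlr.1, hrh⟩ _ (c-1) 0 (by omega) (by omega)]
      rw [zero_add, if_neg hz, slice_from_neg_one_step _ (c-1) (by omega) (by omega)]
      exact pvF_eq_count _ _
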